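-- pv_equiv track=rewrite | github.com/jorgeruiz11/ProcesoDigitalImagenes | tarea5/ManejadorImagen.py | calcula_regiones
-- ===== SOURCE A (Python) =====
-- def calcula_regiones(tam, size):
--     x, y = size[0], size[1]
--     l_coords = []
--     yIzq = 0
--     yDer = y
--
--     while yDer < tam[1]:
--         xIzq = 0
--         xDer = x
--         while xDer < tam[0]:
--             l_coords.append((xIzq,yIzq,xDer,yDer))
--
--             xIzq = xDer
--             xDer += x
--
--         xDer = tam[0] - 1
--         l_coords.append((xIzq,yIzq,xDer,yDer))
--
--         yIzq = yDer
--         yDer += y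
--
--     yDer = tam[1] - 1
--
--     xIzq = 0
--     xDer = x
--     while xDer < tam[0]:
--         l_coords.append((xIzq,yIzq,xDer,yDer))
--         xIzq = xDer
--         xDer += x
--
--     xDer = tam[0] - 1
--     l_coords.append((xIzq,yIzq,xDer,yDer))
--
--     return l_coords
-- ===== SOURCE B (Python) =====
-- def _intervals(total, step):
--     # list of (lo, hi) interval pairs: step while the right edge stays
--     # strictly inside total, then one final pair ending at total - 1
--     pairs = []
--     lo, hi = 0, step
--     while hi < total:
--         pairs.append((lo, hi))
--         lo = hi
--         hi += step
--     pairs.append((lo, total - 1))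
--     return pairs
--
-- def calcula_regiones(tam, size):
--     xs = _intervals(tam[0], size[0])
--     ys = _intervals(tam[1], size[1])
--     return [(xi, yi, xd, yd) for (yi, yd) in ys for (xi, xd) in xs]
-- ===== Notes on version B (the rewrite author's own statement) =====
-- stated objective: simpler
-- what changed: Replaces A's duplicated inner loop and trailing-row code by building the x and y interval lists once and producing the grid as a single nested comprehension over them.
import Mathlib
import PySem

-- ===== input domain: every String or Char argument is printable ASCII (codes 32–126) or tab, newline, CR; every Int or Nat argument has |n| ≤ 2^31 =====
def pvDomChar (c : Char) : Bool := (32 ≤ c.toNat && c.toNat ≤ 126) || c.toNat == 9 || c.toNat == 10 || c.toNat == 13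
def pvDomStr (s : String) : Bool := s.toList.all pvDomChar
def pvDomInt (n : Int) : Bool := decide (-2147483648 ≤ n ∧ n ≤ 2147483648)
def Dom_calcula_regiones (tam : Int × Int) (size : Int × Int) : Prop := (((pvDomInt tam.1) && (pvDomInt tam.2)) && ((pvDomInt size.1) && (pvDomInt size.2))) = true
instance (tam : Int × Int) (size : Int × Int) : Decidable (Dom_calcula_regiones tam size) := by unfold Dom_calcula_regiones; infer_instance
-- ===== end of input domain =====

-- B replaces A's duplicated column loop and trailing-row block by two interval
-- lists combined in one nested comprehension (objective: simpler).


-- ===== PORT A =====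
-- one row of A: the inner 'while xDer < tam0' loop plus the trailing append with
-- xDer = tam0 - 1.  The '1 ≤ x' conjunct only makes the recursion total: when
-- the Python loop terminates it either has x ≥ 1 or never runs its body, so the guard is faithful there.
def pvRowA (tam0 x yIzq yDer xIzq xDer : Int) (acc : List (Int × Int × Int × Int)) :
    List (Int × Int × Int × Int) :=
  if h : xDer < tam0 ∧ 1 ≤ x then
    pvRowA tam0 x yIzq yDer xDer (xDer + x) (acc ++ [(xIzq, yIzq, xDer, yDer)])
  else
    acc ++ [(xIzq, yIzq, tam0 - 1, yDer)]
termination_by (tam0 - xDer).toNat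
decreasing_by omega

-- the outer 'while yDer < tam1' loop, then the final row with yDer = tam1 - 1
def pvOuterA (tam0 tam1 x y yIzq yDer : Int) (acc : List (Int × Int × Int × Int)) :
    List (Int × Int × Int × Int) :=
  if h : yDer < tam1 ∧ 1 ≤ y then
    pvOuterA tam0 tam1 x y yDer (yDer + y) (pvRowA tam0 x yIzq yDer 0 x acc)
  else
    pvRowA tam0 x yIzq (tam1 - 1) 0 x acc
termination_by (tam1 - yDer).toNat
decreasing_by omega

def calcula_regiones (tam : Int × Int) (size : Int × Int) : List (Int × Int × Int × Int) :=
  pvOuterA tam.1 tam.2 size.1 size.2 0 size.2 []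

-- ===== PORT B =====
-- Source B's _intervals: stepping (lo,hi) pairs while hi < total, then (lo, total-1);
-- the '1 ≤ step' conjunct only makes the recursion total.
def pvIntervals (total step lo hi : Int) : List (Int × Int) :=
  if h : hi < total ∧ 1 ≤ step then
    (lo, hi) :: pvIntervals total step hi (hi + step)
  else
    [(lo, total - 1)]
termination_by (total - hi).toNat
decreasing_by omega

def calcula_regiones_alt (tam : Int × Int) (size : Int × Int) : List (Int × Int × Int × Int) :=
  let xs := pvIntervals tam.1 size.1 0 size.1
  let ys := pvIntervals tam.2 size.2 0 size.2
  ys.flatMap (fun p => xs.map (fun q => (q.1, p.1, q.2, p.2)))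

-- ===== PRECONDITION & SPEC =====
def Spec_calcula_regiones (tam : Int × Int) (size : Int × Int) (out : List (Int × Int × Int × Int)) : Prop := out = calcula_regiones_alt tam size
instance (tam : Int × Int) (size : Int × Int) (out : List (Int × Int × Int × Int)) : Decidable (Spec_calcula_regiones tam size out) := by unfold Spec_calcula_regiones; infer_instance

-- ===== CLAIM (what is proved, stated in full; the proofs are below) =====
def Claim_equal_calcula_regiones : Prop := ∀ (tam : Int × Int) (size : Int × Int), Dom_calcula_regiones tam size → Spec_calcula_regiones tam size (calcula_regiones tam size)

-- ===== LEMMAS AND PROOFS =====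

theorem pvIntervals_pos (total step lo hi : Int) (h : hi < total ∧ 1 ≤ step) :
    pvIntervals total step lo hi = (lo, hi) :: pvIntervals total step hi (hi + step) := by
  rw [pvIntervals]; simp [h]

theorem pvIntervals_neg (total step lo hi : Int) (h : ¬ (hi < total ∧ 1 ≤ step)) :
    pvIntervals total step lo hi = [(lo, total - 1)] := by
  rw [pvIntervals]; simp [h]

theorem pvRowA_eq (tam0 x yIzq yDer xIzq xDer : Int) (acc : List (Int × Int × Int × Int)) :
    pvRowA tam0 x yIzq yDer xIzq xDer acc
      = acc ++ (pvIntervals tam0 x xIzq xDer).map (fun q => (q.1, yIzq, q.2, yDer)) := by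
  fun_induction pvRowA tam0 x yIzq yDer xIzq xDer acc with
  | case1 xIzq xDer acc h ih =>
    rw [ih, pvIntervals_pos _ _ _ _ h]
    simp
  | case2 xIzq xDer acc h =>
    rw [pvIntervals_neg _ _ _ _ h]
    simp

theorem pvOuterA_eq (tam0 tam1 x y yIzq yDer : Int) (acc : List (Int × Int × Int × Int)) :
    pvOuterA tam0 tam1 x y yIzq yDer acc
      = acc ++ (pvIntervals tam1 y yIzq yDer).flatMap
          (fun p => (pvIntervals tam0 x 0 x).map (fun q => (q.1, p.1, q.2, p.2))) := by
  fun_induction pvOuterA tam0 tam1 x y yIzq yDer acc with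
  | case1 yIzq yDer acc h ih =>
    rw [ih, pvRowA_eq, pvIntervals_pos tam1 y _ _ h]
    simp
  | case2 yIzq yDer acc h =>
    rw [pvRowA_eq, pvIntervals_neg tam1 y _ _ h]
    simp [List.flatMap]

-- ===== VERDICT (by name: the statement is the Claim_ definition above) =====
theorem calcula_regiones_spec : Claim_equal_calcula_regiones := by
  intro tam size _
  unfold Spec_calcula_regiones calcula_regiones calcula_regiones_alt
  rw [pvOuterA_eq]
  simp
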